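-- pv_equiv track=rewrite | github.com/Tskysheep/english-grammar-book | convert_u_to_note.py | replace_u_with_notes
-- ===== SOURCE A (Python) =====
-- def replace_u_with_notes(line, mapping, u_positions):
--     """
--     将行中的 <u>...</u> 替换为 <Note note="X">...</Note>。
--     mapping: {u_index: label}
--     """
--     result = []
--     u_index = 0
--     i = 0
--     raw = line
--
--     while i < len(raw):
--         if raw[i:].startswith('<u>'):
--             end_tag = raw.find('</u>', i + 3)
--             if end_tag == -1:
--                 result.append(raw[i:])
--                 break
--             content = raw[i + 3:end_tag]
--
--             if u_index in mapping:
--                 label = mapping[u_index]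
--                 result.append(f'<Note note="{label}">{content}</Note>')
--             else:
--                 # 保留原始 <u> 标签
--                 result.append(f'<u>{content}</u>')
--
--             u_index += 1
--             i = end_tag + 4
--         else:
--             result.append(raw[i])
--             i += 1
--
--     return ''.join(result)
-- ===== SOURCE B (Python) =====
-- def replace_u_with_notes(line, mapping, u_positions):
--     """Single pass using find() to jump between tags, appending whole chunks."""
--     parts = []
--     i = 0
--     u_index = 0
--     while True:
--         start = line.find('<u>', i)
--         if start == -1:
--             parts.append(line[i:])
--             break
--         parts.append(line[i:start])
--         end = line.find('</u>', start + 3)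
--         if end == -1:
--             parts.append(line[start:])
--             break
--         content = line[start + 3:end]
--         if u_index in mapping:
--             parts.append(f'<Note note="{mapping[u_index]}">{content}</Note>')
--         else:
--             parts.append(f'<u>{content}</u>')
--         u_index += 1
--         i = end + 4
--     return ''.join(parts)
-- ===== Notes on version B (the rewrite author's own statement) =====
-- stated objective: faster
-- what changed: Replaced A's character-by-character scan, which builds an O(n) slice per character for startswith, with a single pass that uses str.find to jump directly to the next '<u>' tag and appends whole untouched chunks.
import Mathlib
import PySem

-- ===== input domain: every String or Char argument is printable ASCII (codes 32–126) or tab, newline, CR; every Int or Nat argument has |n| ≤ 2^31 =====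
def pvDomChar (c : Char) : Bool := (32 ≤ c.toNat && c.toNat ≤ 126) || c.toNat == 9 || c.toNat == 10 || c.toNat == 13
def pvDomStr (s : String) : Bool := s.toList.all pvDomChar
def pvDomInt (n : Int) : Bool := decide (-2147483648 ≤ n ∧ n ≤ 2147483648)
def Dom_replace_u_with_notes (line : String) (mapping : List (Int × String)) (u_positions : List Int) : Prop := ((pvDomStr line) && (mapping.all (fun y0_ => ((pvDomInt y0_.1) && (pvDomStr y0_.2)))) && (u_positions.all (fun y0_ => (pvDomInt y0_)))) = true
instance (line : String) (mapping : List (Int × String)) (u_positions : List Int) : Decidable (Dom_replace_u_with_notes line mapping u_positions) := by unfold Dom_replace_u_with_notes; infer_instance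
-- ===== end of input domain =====

-- B replaces A's char-by-char scan (with an O(n) startswith slice per character) by a
-- single pass that uses find() to jump from tag to tag and appends whole chunks.

-- shared formatting of the replacement piece (identical f-string logic in both Pythons)
def pvPiece (mapping : List (Int × String)) (u_index : Int) (content : List Char) : List Char :=
  match PySem.Dict.get? (PySem.Dict.mk mapping) u_index with
  | some (label : String) => "<Note note=\"".toList ++ label.toList ++ "\">".toList ++ content ++ "</Note>".toList
  | none => "<u>".toList ++ content ++ "</u>".toList

-- str.find(sub, i) restricted to the suffix: index of the first occurrence of p in l, scanning left to right
def pvFindSub (p : List Char) (l : List Char) : Option Nat :=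
  if p.isPrefixOf l then some 0
  else
    match l with
    | [] => none
    | _ :: t => (pvFindSub p t).map (· + 1)

theorem pvFindSub_prefix_len {p l : List Char} {s : Nat} (h : pvFindSub p l = some s) :
    s + p.length ≤ l.length := by
  induction l generalizing s with
  | nil =>
    unfold pvFindSub at h
    split at h
    · have := List.IsPrefix.length_le (List.isPrefixOf_iff_prefix.mp ‹_›)
      simp_all
    · simp at h
  | cons hd tl ih =>
    unfold pvFindSub at h
    split at h
    · obtain rfl : (0 : Nat) = s := by simpa using h
      simpa using List.IsPrefix.length_le (List.isPrefixOf_iff_prefix.mp ‹_›)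
    · simp only [Option.map_eq_some_iff] at h
      obtain ⟨s', hs', rfl⟩ := h
      have := ih hs'
      simp; omega

-- ===== PORT A =====
-- A's loop: i moves forward only, so the state is the suffix raw[i:]; char-by-char scan,
-- raw[i:].startswith('<u>') → prefix test, raw.find('</u>', i+3) → pvFindSub on the drop-3 suffix.
def pvGoA (mapping : List (Int × String)) : List Char → Int → List Char
  | raw, u_index =>
    if hraw : raw = [] then []
    else
      if "<u>".toList.isPrefixOf raw then
        match pvFindSub "</u>".toList (raw.drop 3) with
        | none => raw                 -- end tag missing: append raw[i:] and break
        | some k =>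
            let content := (raw.drop 3).take k
            pvPiece mapping u_index content ++ pvGoA mapping ((raw.drop 3).drop (k + 4)) (u_index + 1)
      else
        raw.head hraw :: pvGoA mapping raw.tail u_index
termination_by raw _ => raw.length
decreasing_by
  · have hne : raw.length ≠ 0 := by simpa using hraw
    simp [List.length_drop]; omega
  · simp [List.length_tail]
    cases raw with
    | nil => exact absurd rfl hraw
    | cons a t => simp

def replace_u_with_notes (line : String) (mapping : List (Int × String)) (u_positions : List Int) : String :=
  String.ofList (pvGoA mapping line.toList 0)

-- ===== PORT B =====
-- B's loop: find the next '<u>', append the untouched chunk before it, then the rewritten tag, jump past '</u>'.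
def pvGoB (mapping : List (Int × String)) : List Char → Int → List Char
  | l, u_index =>
    match hs : pvFindSub "<u>".toList l with
    | none => l                        -- parts.append(line[i:]); break
    | some s =>
        let pre := l.take s
        let rest := l.drop s
        match pvFindSub "</u>".toList (rest.drop 3) with
        | none => pre ++ rest          -- parts.append(line[i:start]); parts.append(line[start:]); break
        | some k =>
            let content := (rest.drop 3).take k
            pre ++ pvPiece mapping u_index content ++ pvGoB mapping ((rest.drop 3).drop (k + 4)) (u_index + 1)
termination_by l _ => l.length
decreasing_by
  · have hs2 := pvFindSub_prefix_len hs
    simp [List.length_drop]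
    simp at hs2
    omega

def replace_u_with_notes_alt (line : String) (mapping : List (Int × String)) (u_positions : List Int) : String :=
  String.ofList (pvGoB mapping line.toList 0)

-- ===== PRECONDITION & SPEC =====
def Spec_replace_u_with_notes (line : String) (mapping : List (Int × String)) (u_positions : List Int) (out : String) : Prop := out = replace_u_with_notes_alt line mapping u_positions
instance (line : String) (mapping : List (Int × String)) (u_positions : List Int) (out : String) : Decidable (Spec_replace_u_with_notes line mapping u_positions out) := by unfold Spec_replace_u_with_notes; infer_instance

-- ===== CLAIM (what is proved, stated in full; the proofs are below) =====
def Claim_equal_replace_u_with_notes : Prop := ∀ (line : String) (mapping : List (Int × String)) (u_positions : List Int), Dom_replace_u_with_notes line mapping u_positions → Spec_replace_u_with_notes line mapping u_positions (replace_u_with_notes line mapping u_positions)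

-- ===== LEMMAS AND PROOFS =====

theorem pvFindSub_of_prefix {p l : List Char} (hp : p.isPrefixOf l) :
    pvFindSub p l = some 0 := by
  rw [pvFindSub.eq_def]; simp [hp]

theorem pvFindSub_cons_of_not_prefix {p : List Char} {h : Char} {t : List Char}
    (hp : ¬ p.isPrefixOf (h :: t)) :
    pvFindSub p (h :: t) = (pvFindSub p t).map (· + 1) := by
  rw [pvFindSub.eq_def]; simp [hp]

theorem pvGoA_nil (m : List (Int × String)) (u : Int) : pvGoA m [] u = [] := by
  rw [pvGoA]; simp

theorem pvGoA_prefix_none {l : List Char} (m : List (Int × String)) (u : Int)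
    (hl : l ≠ []) (hp : "<u>".toList.isPrefixOf l)
    (hf : pvFindSub "</u>".toList (l.drop 3) = none) :
    pvGoA m l u = l := by
  rw [pvGoA]; split <;> simp_all

theorem pvGoA_prefix_some {l : List Char} {k : Nat} (m : List (Int × String)) (u : Int)
    (hl : l ≠ []) (hp : "<u>".toList.isPrefixOf l)
    (hf : pvFindSub "</u>".toList (l.drop 3) = some k) :
    pvGoA m l u = pvPiece m u ((l.drop 3).take k) ++ pvGoA m ((l.drop 3).drop (k + 4)) (u + 1) := by
  rw [pvGoA]
  split
  · simp_all
  · split <;> simp_all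

theorem pvGoA_cons_of_not_prefix {h : Char} {t : List Char} (m : List (Int × String)) (u : Int)
    (hp : ¬ "<u>".toList.isPrefixOf (h :: t)) :
    pvGoA m (h :: t) u = h :: pvGoA m t u := by
  rw [pvGoA]
  rw [dif_neg (List.cons_ne_nil h t), if_neg hp]
  simp

theorem pvGoB_none {l : List Char} (m : List (Int × String)) (u : Int)
    (hs : pvFindSub "<u>".toList l = none) :
    pvGoB m l u = l := by
  rw [pvGoB]; split <;> simp_all

theorem pvGoB_some_none {l : List Char} {s : Nat} (m : List (Int × String)) (u : Int)
    (hs : pvFindSub "<u>".toList l = some s)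
    (hf : pvFindSub "</u>".toList ((l.drop s).drop 3) = none) :
    pvGoB m l u = l.take s ++ l.drop s := by
  rw [pvGoB]
  split
  · simp_all
  · rename_i s' hs'
    rw [hs'] at hs
    injection hs with hs; subst hs
    simp only [hf]

theorem pvGoB_some_some {l : List Char} {s k : Nat} (m : List (Int × String)) (u : Int)
    (hs : pvFindSub "<u>".toList l = some s)
    (hf : pvFindSub "</u>".toList ((l.drop s).drop 3) = some k) :
    pvGoB m l u = l.take s ++ (pvPiece m u (((l.drop s).drop 3).take k)
      ++ pvGoB m (((l.drop s).drop 3).drop (k + 4)) (u + 1)) := by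
  rw [pvGoB]
  split
  · simp_all
  · rename_i s' hs'
    rw [hs'] at hs
    injection hs with hs; subst hs
    simp only [hf]
    simp [List.append_assoc]

theorem pvGoA_eq_pvGoB (mapping : List (Int × String)) :
    ∀ n l, List.length l ≤ n → ∀ u, pvGoA mapping l u = pvGoB mapping l u := by
  intro n
  induction n with
  | zero =>
    intro l hl u
    have hnil : l = [] := by cases l <;> simp_all
    subst hnil
    rw [pvGoA_nil, pvGoB_none]
    decide
  | succ n ih =>
    intro l hl u
    by_cases hp : "<u>".toList.isPrefixOf l
    · have hnil : l ≠ [] := by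
        intro h; subst h; revert hp; decide
      have hs : pvFindSub "<u>".toList l = some 0 := pvFindSub_of_prefix hp
      have hlen : 1 ≤ l.length := by cases l <;> simp_all
      cases hf : pvFindSub "</u>".toList (l.drop 3) with
      | none =>
        rw [pvGoA_prefix_none mapping u hnil hp hf,
            pvGoB_some_none mapping u hs (by simpa using hf)]
        simp
      | some k =>
        have hk := pvFindSub_prefix_len hf
        simp only [List.length_drop] at hk
        rw [pvGoA_prefix_some mapping u hnil hp hf,
            pvGoB_some_some mapping u hs (by simpa using hf)]
        simp only [List.take_zero, List.drop_zero, List.nil_append]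
        congr 1
        exact ih _ (by simp only [List.length_drop]; omega) (u + 1)
    · cases l with
      | nil =>
        rw [pvGoA_nil, pvGoB_none]
        decide
      | cons h t =>
        have hstep : pvFindSub "<u>".toList (h :: t) = (pvFindSub "<u>".toList t).map (· + 1) :=
          pvFindSub_cons_of_not_prefix hp
        have hlt : t.length ≤ n := by simp at hl; omega
        rw [pvGoA_cons_of_not_prefix mapping u hp, ih t hlt u]
        cases ht : pvFindSub "<u>".toList t with
        | none =>
          rw [pvGoB_none mapping u ht,
              pvGoB_none mapping u (by rw [hstep, ht]; rfl)]
        | some s =>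
          have hsc : pvFindSub "<u>".toList (h :: t) = some (s + 1) := by
            rw [hstep, ht]; rfl
          cases hf : pvFindSub "</u>".toList ((t.drop s).drop 3) with
          | none =>
            rw [pvGoB_some_none mapping u ht hf,
                pvGoB_some_none mapping u hsc (by simpa using hf)]
            simp
          | some k =>
            rw [pvGoB_some_some mapping u ht hf,
                pvGoB_some_some mapping u hsc (by simpa using hf)]
            simp

-- ===== VERDICT (by name: the statement is the Claim_ definition above) =====
theorem replace_u_with_notes_spec : Claim_equal_replace_u_with_notes := by
  intro line mapping u_positions _
  unfold Spec_replace_u_with_notes replace_u_with_notes replace_u_with_notes_alt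
  rw [pvGoA_eq_pvGoB mapping line.toList.length line.toList le_rfl]
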